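-- pv_equiv track=rewrite | github.com/locharp/code-snippets | Coding Ninjas/Coding World Cup 2023/Easy/Day 27: PAK vs BAN: Bowler's Plan.py | kthUnique
-- ===== SOURCE A (Python) =====
-- def kthUnique( n: int, s: str, k: int ) -> str:
--
--     if k < 1:
--         return "?"
--
--     a = set()
--     k -= 1
--
--     for i in s:
--         if i not in a:
--             if len( a ) < k:
--                 a.add( i )
--             else:
--                 return i
--
--     return "?"
-- ===== SOURCE B (Python) =====
-- def kthUnique(n: int, s: str, k: int) -> str:
--     if k < 1:
--         return "?"
--     while s:
--         if k == 1:
--             return s[0]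
--         s = s[1:].replace(s[0], "")
--         k -= 1
--     return "?"
-- ===== Notes on version B (the rewrite author's own statement) =====
-- stated objective: alternative
-- what changed: Replaces A's single streaming pass with a seen-set and counter by a set-free repeated-filtering loop: while the string is nonempty, if k==1 answer its first character, otherwise delete every occurrence of that first character (str.replace) and decrement k.
import Mathlib
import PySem

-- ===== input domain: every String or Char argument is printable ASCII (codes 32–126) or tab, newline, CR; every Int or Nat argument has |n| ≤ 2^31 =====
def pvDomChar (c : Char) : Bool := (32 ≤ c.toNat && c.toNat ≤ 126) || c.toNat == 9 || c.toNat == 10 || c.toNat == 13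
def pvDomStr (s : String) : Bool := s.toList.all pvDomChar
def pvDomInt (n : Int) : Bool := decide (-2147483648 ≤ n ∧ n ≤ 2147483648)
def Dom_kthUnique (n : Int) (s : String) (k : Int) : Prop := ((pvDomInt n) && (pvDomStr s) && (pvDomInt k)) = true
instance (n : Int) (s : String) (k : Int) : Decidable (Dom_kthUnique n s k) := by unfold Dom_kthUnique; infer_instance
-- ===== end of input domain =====

-- B replaces A's streaming seen-set pass by a set-free repeated-filtering loop
-- (strip the first character and all its occurrences, decrement k) — alternative.

-- ===== PORT A =====
-- the 'for i in s' loop with the seen-set `a` and the decremented threshold `kk` (= k-1)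
def kthUniqueLoop (kk : Int) (a : PySem.Set Char) : List Char → String
  | [] => "?"
  | i :: rest =>
    if ¬ (PySem.Set.contains a i) then
      if (PySem.Set.len a : Int) < kk then kthUniqueLoop kk (PySem.Set.add a i) rest
      else i.toString
    else kthUniqueLoop kk a rest

def kthUnique (n : Int) (s : String) (k : Int) : String :=
  if k < 1 then "?"
  else kthUniqueLoop (k - 1) PySem.Set.empty s.toList

-- ===== PORT B =====
-- the 'while s:' loop; s[1:].replace(s[0], "") is ported as filtering out the head character
def kthUniqueGo : List Char → Int → String
  | [], _ => "?"
  | c :: rest, k =>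
    if k == 1 then c.toString
    else kthUniqueGo (rest.filter (fun x => x != c)) (k - 1)
termination_by t _ => t.length
decreasing_by
  simpa using Nat.lt_succ_of_le (List.length_filter_le _ _)

def kthUnique_alt (n : Int) (s : String) (k : Int) : String :=
  if k < 1 then "?" else kthUniqueGo s.toList k

-- ===== PRECONDITION & SPEC =====
def Spec_kthUnique (n : Int) (s : String) (k : Int) (out : String) : Prop := out = kthUnique_alt n s k
instance (n : Int) (s : String) (k : Int) (out : String) : Decidable (Spec_kthUnique n s k out) := by unfold Spec_kthUnique; infer_instance

-- ===== CLAIM (what is proved, stated in full; the proofs are below) =====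
def Claim_equal_kthUnique : Prop := ∀ (n : Int) (s : String) (k : Int), Dom_kthUnique n s k → Spec_kthUnique n s k (kthUnique n s k)

-- ===== LEMMAS AND PROOFS =====

-- fresh distinct characters of l, in first-appearance order, skipping those already in a
def firstNew (a : List Char) : List Char → List Char
  | [] => []
  | i :: rest => if i ∈ a then firstNew a rest else i :: firstNew (i :: a) rest

theorem firstNew_congr : ∀ (l a b : List Char), (∀ c, c ∈ a ↔ c ∈ b) →
    firstNew a l = firstNew b l := by
  intro l
  induction l with
  | nil => intro a b _; rfl
  | cons i rest ih =>
    intro a b h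
    simp only [firstNew]
    by_cases hi : i ∈ a
    · rw [if_pos hi, if_pos ((h i).mp hi)]; exact ih a b h
    · rw [if_neg hi, if_neg (fun hb => hi ((h i).mpr hb))]
      congr 1
      exact ih (i :: a) (i :: b) (fun c => by simp [h c])

-- A's loop returns the (kk - |a|)-th fresh distinct character, if any
theorem loop_eq : ∀ (l a : List Char) (kk : Int), (a.length : Int) ≤ kk →
    kthUniqueLoop kk a l =
      match (firstNew a l)[(kk - a.length).toNat]? with
      | some c => c.toString
      | none => "?" := by
  intro l
  induction l with
  | nil => intro a kk _; rfl
  | cons i rest ih =>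
    intro a kk hle
    simp only [kthUniqueLoop, firstNew, PySem.Set.contains, PySem.Set.len]
    by_cases hi : i ∈ a
    · simp only [List.contains_eq_mem, hi, decide_true, not_true, if_false, if_pos]
      exact ih a kk hle
    · simp only [List.contains_eq_mem, hi, decide_false, Bool.false_eq_true,
        not_false_eq_true, if_true]
      by_cases hlt : (a.length : Int) < kk
      · rw [if_pos hlt]
        have hadd : PySem.Set.add a i = a ++ [i] := by
          simp [PySem.Set.add, PySem.Set.contains, hi]
        rw [hadd, ih (a ++ [i]) kk (by simp; omega)]
        rw [firstNew_congr rest (a ++ [i]) (i :: a) (fun c => by simp; tauto)]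
        have h1 : (kk - a.length).toNat = (kk - (a ++ [i]).length).toNat + 1 := by
          simp; omega
        rw [h1, if_neg not_false, List.getElem?_cons_succ]
      · rw [if_neg hlt]
        have h0 : (kk - a.length).toNat = 0 := by omega
        rw [h0, if_neg not_false, List.getElem?_cons_zero]

-- filtering one character out of the list = putting it into the accumulator
theorem firstNew_filter : ∀ (l a : List Char) (c : Char),
    firstNew a (l.filter (fun x => x != c)) = firstNew (c :: a) l := by
  intro l
  induction l with
  | nil => intro a c; rfl
  | cons i rest ih =>
    intro a c
    by_cases hic : i = c
    · subst hic
      simp only [List.filter_cons, bne_self_eq_false, Bool.false_eq_true, if_false,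
        firstNew, List.mem_cons, true_or, if_pos]
      exact ih a i
    · have hfc : List.filter (fun x => x != c) (i :: rest)
          = i :: rest.filter (fun x => x != c) := by
        simp [List.filter_cons, hic]
      rw [hfc]
      simp only [firstNew, List.mem_cons]
      by_cases hia : i ∈ a
      · rw [if_pos hia, if_pos (Or.inr hia)]; exact ih a c
      · rw [if_neg hia, if_neg (by tauto)]
        congr 1
        rw [ih (i :: a) c]
        exact firstNew_congr rest (c :: i :: a) (i :: c :: a) (fun x => by simp; tauto)

-- B's loop also returns the (k-1)-th element of the fresh-distinct list
theorem go_eq : ∀ (m : Nat) (t : List Char) (k : Int), t.length ≤ m → 1 ≤ k →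
    kthUniqueGo t k =
      match (firstNew [] t)[(k - 1).toNat]? with
      | some c => c.toString
      | none => "?" := by
  intro m
  induction m with
  | zero =>
    intro t k ht _
    have : t = [] := List.length_eq_zero_iff.mp (Nat.le_zero.mp ht)
    subst this; simp [kthUniqueGo, firstNew]
  | succ m ih =>
    intro t k ht hk
    cases t with
    | nil => simp [kthUniqueGo, firstNew]
    | cons c rest =>
      rw [kthUniqueGo]
      have hfn : firstNew [] (c :: rest) = c :: firstNew [c] rest := by
        simp [firstNew]
      by_cases hk1 : k = 1
      · subst hk1
        simp [hfn]
      · rw [if_neg (by simpa using hk1)]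
        rw [ih (rest.filter (fun x => x != c)) (k - 1)
          (le_trans (List.length_filter_le _ _) (by simpa using ht)) (by omega)]
        rw [firstNew_filter rest [] c, hfn]
        have h1 : (k - 1).toNat = (k - 1 - 1).toNat + 1 := by omega
        rw [h1, List.getElem?_cons_succ]

-- ===== VERDICT (by name: the statement is the Claim_ definition above) =====
theorem kthUnique_spec : Claim_equal_kthUnique := by
  intro n s k _
  unfold Spec_kthUnique kthUnique kthUnique_alt
  by_cases hk : k < 1
  · rw [if_pos hk, if_pos hk]
  · rw [if_neg hk, if_neg hk]
    have hA := loop_eq s.toList [] (k - 1) (by simp; omega)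
    have h0 : (k - 1 - ((([] : List Char).length : Nat) : Int)).toNat = (k - 1).toNat := by
      simp
    rw [h0] at hA
    rw [show (PySem.Set.empty : PySem.Set Char) = [] from rfl, hA]
    rw [go_eq s.toList.length s.toList k le_rfl (by omega)]
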